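-- pv_equiv track=rewrite | github.com/jazzking7/HEGEMONY-Online-Version | Backend/skills.py | get_best_outcome
-- ===== SOURCE A (Python) =====
-- def get_best_outcome(outcomes, defending):
--     if defending:
--         # Defender optimization
--         wins = [o for o in outcomes if o[0] == 0]  # attacker has 0 troops
--         if wins:
--             # Pick the defender win with the most remaining defender troops
--             optimal = max(wins, key=lambda x: x[1])
--         else:
--             # No defender wins; pick loss that caused most damage to attacker
--             losses = [o for o in outcomes if o[1] == 0]
--             optimal = min(losses, key=lambda x: x[0]) if losses else None
--     else:
--         # Attacker optimization
--         wins = [o for o in outcomes if o[1] == 0]  # defender has 0 troops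
--         if wins:
--             # Pick the attacker win with the most remaining attacker troops
--             optimal = max(wins, key=lambda x: x[0])
--         else:
--             # No attacker wins; pick loss that caused most damage to defender
--             losses = [o for o in outcomes if o[0] == 0]
--             optimal = min(losses, key=lambda x: x[1]) if losses else None
--
--     return optimal
-- ===== SOURCE B (Python) =====
-- def get_best_outcome(outcomes, defending):
--     # Single pass, keeping the current best win and best loss (each with its key).
--     best_win = None   # (key, outcome): win = first coord (role-dependent) == 0, maximize key
--     best_loss = None  # (key, outcome): loss, minimize key
--     for o in outcomes:
--         a, b = (o[0], o[1]) if defending else (o[1], o[0])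
--         if a == 0:
--             if best_win is None or best_win[0] < b:
--                 best_win = (b, o)
--         elif b == 0:
--             if best_loss is None or a < best_loss[0]:
--                 best_loss = (a, o)
--     if best_win is not None:
--         return best_win[1]
--     return best_loss[1] if best_loss is not None else None
-- ===== Notes on version B (the rewrite author's own statement) =====
-- stated objective: alternative
-- what changed: Replaced the build-filtered-lists-then-max/min structure by a single fold over outcomes that maintains a running best win and best loss (each with its comparison key, updated only on strict improvement to keep first-occurrence tie-breaking), returning the best win if any else the best loss.
import Mathlib
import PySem

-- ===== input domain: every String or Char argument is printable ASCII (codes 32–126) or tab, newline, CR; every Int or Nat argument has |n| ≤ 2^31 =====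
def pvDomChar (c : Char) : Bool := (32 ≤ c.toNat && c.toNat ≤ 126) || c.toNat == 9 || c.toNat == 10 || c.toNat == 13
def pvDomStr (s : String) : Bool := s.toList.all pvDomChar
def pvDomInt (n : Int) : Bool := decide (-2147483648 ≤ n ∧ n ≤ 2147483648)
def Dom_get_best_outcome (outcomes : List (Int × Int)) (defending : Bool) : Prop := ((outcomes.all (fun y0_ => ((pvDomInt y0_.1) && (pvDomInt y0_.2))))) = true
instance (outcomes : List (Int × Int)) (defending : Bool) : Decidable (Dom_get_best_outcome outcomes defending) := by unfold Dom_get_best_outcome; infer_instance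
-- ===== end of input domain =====

-- B replaces A's filtered lists + max/min passes by one fold keeping a running best win and best loss (alternative decomposition, same cost class).

-- ===== PORT A =====
def get_best_outcome (outcomes : List (Int × Int)) (defending : Bool) : Option (Int × Int) :=
  if defending then
    let wins := outcomes.filter (fun o => o.1 == 0)
    if wins ≠ [] then
      PySem.List.max? wins (fun x => x.2)
    else
      let losses := outcomes.filter (fun o => o.2 == 0)
      if losses ≠ [] then PySem.List.min? losses (fun x => x.1) else none
  else
    let wins := outcomes.filter (fun o => o.2 == 0)
    if wins ≠ [] then
      PySem.List.max? wins (fun x => x.1)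
    else
      let losses := outcomes.filter (fun o => o.1 == 0)
      if losses ≠ [] then PySem.List.min? losses (fun x => x.2) else none

-- ===== PORT B =====
def get_best_outcome_alt (outcomes : List (Int × Int)) (defending : Bool) : Option (Int × Int) :=
  let st := outcomes.foldl
    (fun (st : Option (Int × (Int × Int)) × Option (Int × (Int × Int))) o =>
      let a := if defending then o.1 else o.2
      let b := if defending then o.2 else o.1
      if a == 0 then
        (match st.1 with
         | none => some (b, o)
         | some w => if w.1 < b then some (b, o) else some w, st.2)
      else if b == 0 then
        (st.1,
         match st.2 with
         | none => some (a, o)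
         | some l => if a < l.1 then some (a, o) else some l)
      else st)
    (none, none)
  match st.1 with
  | some w => some w.2
  | none =>
    match st.2 with
    | some l => some l.2
    | none => none

-- ===== PRECONDITION & SPEC =====
def Spec_get_best_outcome (outcomes : List (Int × Int)) (defending : Bool) (out : Option (Int × Int)) : Prop := out = get_best_outcome_alt outcomes defending
instance (outcomes : List (Int × Int)) (defending : Bool) (out : Option (Int × Int)) : Decidable (Spec_get_best_outcome outcomes defending out) := by unfold Spec_get_best_outcome; infer_instance

-- ===== CLAIM (what is proved, stated in full; the proofs are below) =====
def Claim_equal_get_best_outcome : Prop := ∀ (outcomes : List (Int × Int)) (defending : Bool), Dom_get_best_outcome outcomes defending → Spec_get_best_outcome outcomes defending (get_best_outcome outcomes defending)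

-- ===== LEMMAS AND PROOFS =====

-- B's fold step, abstracted over the two role-dependent coordinate readers f (win test / loss key) and g (win key / loss test).
def pvStep (f g : Int × Int → Int)
    (st : Option (Int × (Int × Int)) × Option (Int × (Int × Int))) (o : Int × Int) :
    Option (Int × (Int × Int)) × Option (Int × (Int × Int)) :=
  if f o == 0 then
    (match st.1 with
     | none => some (g o, o)
     | some w => if w.1 < g o then some (g o, o) else some w, st.2)
  else if g o == 0 then
    (st.1,
     match st.2 with
     | none => some (f o, o)
     | some l => if f o < l.1 then some (f o, o) else some l)
  else st

def pvMaxStep (g : Int × Int → Int) (acc : Option (Int × (Int × Int))) (o : Int × Int) :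
    Option (Int × (Int × Int)) :=
  match acc with
  | none => some (g o, o)
  | some w => if w.1 < g o then some (g o, o) else some w

def pvMinStep (f : Int × Int → Int) (acc : Option (Int × (Int × Int))) (o : Int × Int) :
    Option (Int × (Int × Int)) :=
  match acc with
  | none => some (f o, o)
  | some l => if f o < l.1 then some (f o, o) else some l

-- The paired fold splits into two independent folds over the two filtered sublists.
theorem pv_fold_split (f g : Int × Int → Int) (xs : List (Int × Int))
    (bw bl : Option (Int × (Int × Int))) :
    xs.foldl (pvStep f g) (bw, bl) =
      ((xs.filter (fun o => f o == 0)).foldl (pvMaxStep g) bw,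
       (xs.filter (fun o => f o != 0 && g o == 0)).foldl (pvMinStep f) bl) := by
  induction xs generalizing bw bl with
  | nil => rfl
  | cons x t ih =>
    simp only [List.foldl_cons, List.filter_cons]
    by_cases hf : f x = 0
    · simp [pvStep, pvMaxStep, hf, ih]
    · by_cases hg : g x = 0
      · simp [pvStep, pvMinStep, hf, hg, ih]
      · simp [pvStep, hf, hg, ih]

-- The keyed max fold is PySem's max? carrying its key alongside.
theorem pv_maxfold (g : Int × Int → Int) (xs : List (Int × Int)) (acc : Option (Int × Int)) :
    xs.foldl (pvMaxStep g) (acc.map (fun m => (g m, m))) =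
      (xs.foldl
        (fun acc x =>
          match acc with
          | none => some x
          | some m => if g m < g x then some x else some m) acc).map (fun m => (g m, m)) := by
  induction xs generalizing acc with
  | nil => rfl
  | cons x t ih =>
    cases acc with
    | none => exact ih (some x)
    | some m =>
      simp only [List.foldl_cons, Option.map_some, pvMaxStep]
      by_cases h : g m < g x
      · simpa [h] using ih (some x)
      · simpa [h] using ih (some m)

theorem pv_minfold (f : Int × Int → Int) (xs : List (Int × Int)) (acc : Option (Int × Int)) :
    xs.foldl (pvMinStep f) (acc.map (fun m => (f m, m))) =
      (xs.foldl
        (fun acc x =>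
          match acc with
          | none => some x
          | some m => if f x < f m then some x else some m) acc).map (fun m => (f m, m)) := by
  induction xs generalizing acc with
  | nil => rfl
  | cons x t ih =>
    cases acc with
    | none => exact ih (some x)
    | some m =>
      simp only [List.foldl_cons, Option.map_some, pvMinStep]
      by_cases h : f x < f m
      · simpa [h] using ih (some x)
      · simpa [h] using ih (some m)

theorem pv_maxfold_none (g : Int × Int → Int) (xs : List (Int × Int)) :
    xs.foldl (pvMaxStep g) none = (PySem.List.max? xs g).map (fun m => (g m, m)) := by
  have h : PySem.List.max? xs g =
      xs.foldl
        (fun acc x =>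
          match acc with
          | none => some x
          | some m => if g m < g x then some x else some m) none := by
    unfold PySem.List.max?
    congr 1
    funext acc x
    cases acc <;> rfl
  rw [h]
  exact pv_maxfold g xs none

theorem pv_minfold_none (f : Int × Int → Int) (xs : List (Int × Int)) :
    xs.foldl (pvMinStep f) none = (PySem.List.min? xs f).map (fun m => (f m, m)) := by
  have h : PySem.List.min? xs f =
      xs.foldl
        (fun acc x =>
          match acc with
          | none => some x
          | some m => if f x < f m then some x else some m) none := by
    unfold PySem.List.min?
    congr 1
    funext acc x
    cases acc <;> rfl
  rw [h]
  exact pv_minfold f xs none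

-- When no element wins, the loss filter with and without the not-win conjunct coincide.
theorem pv_filter_loss (f g : Int × Int → Int) (xs : List (Int × Int))
    (h : xs.filter (fun o => f o == 0) = []) :
    xs.filter (fun o => f o != 0 && g o == 0) = xs.filter (fun o => g o == 0) := by
  have hall : ∀ o ∈ xs, ¬ ((f o == 0) = true) := List.filter_eq_nil_iff.mp h
  apply List.filter_congr
  intro o ho
  have := hall o ho
  cases hfo : (f o == 0) <;> simp_all

-- A's filtered-lists-then-max/min shape equals B's single paired fold, for either role's readers f, g.
theorem pv_main (f g : Int × Int → Int) (xs : List (Int × Int)) :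
    (let wins := xs.filter (fun o => f o == 0)
     if wins ≠ [] then PySem.List.max? wins g
     else
       let losses := xs.filter (fun o => g o == 0)
       if losses ≠ [] then PySem.List.min? losses f else none)
    = (let st := xs.foldl (pvStep f g) (none, none)
       match st.1 with
       | some w => some w.2
       | none =>
         match st.2 with
         | some l => some l.2
         | none => none) := by
  simp only [pv_fold_split, pv_maxfold_none, pv_minfold_none]
  by_cases hw : xs.filter (fun o => f o == 0) = []
  · have hmax : PySem.List.max? (xs.filter (fun o => f o == 0)) g = none :=
      (PySem.List.max?_eq_none_iff _ _).mpr hw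
    rw [hmax, pv_filter_loss f g xs hw]
    by_cases hl : xs.filter (fun o => g o == 0) = []
    · have hmin : PySem.List.min? (xs.filter (fun o => g o == 0)) f = none :=
        (PySem.List.min?_eq_none_iff _ _).mpr hl
      simp [hl, PySem.List.min?]
    · cases hmin : PySem.List.min? (xs.filter (fun o => g o == 0)) f with
      | none => exact absurd ((PySem.List.min?_eq_none_iff _ _).mp hmin) hl
      | some l =>
        have hall := List.filter_eq_nil_iff.mp hw
        simp [hl]
        exact fun a b hab => by simpa using hall (a, b) hab
  · cases hmax : PySem.List.max? (xs.filter (fun o => f o == 0)) g with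
    | none => exact absurd ((PySem.List.max?_eq_none_iff _ _).mp hmax) hw
    | some w => simp [hw]

-- ===== VERDICT (by name: the statement is the Claim_ definition above) =====
theorem get_best_outcome_spec : Claim_equal_get_best_outcome := by
  intro outcomes defending _
  show get_best_outcome outcomes defending = get_best_outcome_alt outcomes defending
  cases defending with
  | false => exact pv_main (fun o => o.2) (fun o => o.1) outcomes
  | true => exact pv_main (fun o => o.1) (fun o => o.2) outcomes
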